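-- pv_equiv track=rewrite | github.com/huggin/gfg | array/maximum_bitonic_subarray_sum.py | maxSumBitonicSubArr
-- ===== SOURCE A (Python) =====
-- def maxSumBitonicSubArr(a, n):
--     # Code here
--     a[:] = map(int, a)
--     left, right = [0] * n, [0] * n
--     left[0] = a[0]
--     for i in range(1, n):
--         if a[i] > a[i - 1]:
--             left[i] = left[i - 1] + a[i]
--         else:
--             left[i] = a[i]
--
--     right[n - 1] = a[n - 1]
--     for i in range(n - 2, -1, -1):
--         if a[i] > a[i + 1]:
--             right[i] = right[i + 1] + a[i]
--         else:
--             right[i] = a[i]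
--
--     ans = 0
--     for i in range(n):
--         ans = max(left[i] + right[i] - a[i], ans)
--
--     return ans
-- ===== SOURCE B (Python) =====
-- def maxSumBitonicSubArr(a, n):
--     # Single forward run-scan, O(1) extra space (no left/right arrays):
--     # keep the sum 'up' of the strictly increasing run ending at the current
--     # index, and on each strictly decreasing run walk it once backward to
--     # score its suffixes and the peak.  Mutates a like the original.
--     a[:] = map(int, a)
--     ans = 0
--     up = a[0]
--     i = 1
--     while i < n:
--         if a[i] < a[i - 1]:
--             # peak at i-1; find the end v of the strictly decreasing run
--             v = i
--             while v + 1 < n and a[v + 1] < a[v]: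
--                 v += 1
--             r = 0
--             for j in range(v, i - 1, -1):
--                 r += a[j]
--                 ans = max(ans, r)
--             ans = max(ans, up + r)
--             up = a[v]
--             i = v + 1
--         else:
--             ans = max(ans, up)
--             up = a[i] if a[i] == a[i - 1] else up + a[i]
--             i += 1
--     ans = max(ans, up)
--     return ans
-- ===== Notes on version B (the rewrite author's own statement) =====
-- stated objective: alternative
-- what changed: A makes three passes building two length-n auxiliary arrays (left/right run sums) and then maxes their combination; B is a single forward run-scan with O(1) extra state that carries the increasing-run sum and walks each strictly decreasing run once backward to score its suffixes and its peak.
import Mathlib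
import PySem

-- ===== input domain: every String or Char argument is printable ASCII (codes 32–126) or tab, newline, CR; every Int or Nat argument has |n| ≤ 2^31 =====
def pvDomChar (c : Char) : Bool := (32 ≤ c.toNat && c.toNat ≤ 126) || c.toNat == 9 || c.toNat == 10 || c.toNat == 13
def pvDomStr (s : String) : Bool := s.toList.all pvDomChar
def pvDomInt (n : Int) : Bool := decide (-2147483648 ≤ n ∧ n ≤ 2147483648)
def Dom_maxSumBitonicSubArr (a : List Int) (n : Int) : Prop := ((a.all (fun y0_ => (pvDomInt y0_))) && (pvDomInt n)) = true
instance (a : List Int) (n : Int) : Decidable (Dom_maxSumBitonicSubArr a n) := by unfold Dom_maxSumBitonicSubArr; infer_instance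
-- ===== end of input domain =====

-- B replaces A's three passes over two auxiliary arrays by a single forward run-scan with O(1)
-- extra state (each strictly decreasing run is walked once backward to score its suffixes).
-- Python A and B both execute `a[:] = map(int, a)`, a mutation of the argument; on List Int
-- inputs int() is the identity, so the ports omit it.  Under Pre_ every index read is in
-- range, so List.getD is an exact rendering of Python's a[i].

-- ===== PORT A =====
-- forward loop `for i in range(1, n)` building left[1..n-1]; the state carried is
-- prev = left[i-1]; the produced list is [left[i], ..., left[i+cnt-1]]
def pvLeftTail (a : List Int) (prev : Int) (i : Nat) : Nat → List Int
  | 0 => []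
  | c + 1 =>
    let cur := if a.getD i 0 > a.getD (i - 1) 0 then prev + a.getD i 0 else a.getD i 0
    cur :: pvLeftTail a cur (i + 1) c

-- backward loop `for i in range(n-2, -1, -1)`: pvRightFrom a i c = [right[i], ..., right[i+c]]
-- (the head of the recursive result is right[i+1], exactly the slot the Python loop reads)
def pvRightFrom (a : List Int) (i : Nat) : Nat → List Int
  | 0 => [a.getD i 0]
  | c + 1 =>
    let rest := pvRightFrom a (i + 1) c
    (if a.getD i 0 > a.getD (i + 1) 0 then rest.headD 0 + a.getD i 0 else a.getD i 0) :: rest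

def maxSumBitonicSubArr (a : List Int) (n : Int) : Int :=
  let nn := n.toNat
  let a0 := a.getD 0 0
  let left := a0 :: pvLeftTail a a0 1 (nn - 1)
  let right := pvRightFrom a 0 (nn - 1)
  (List.range nn).foldl (fun ans i => max (left.getD i 0 + right.getD i 0 - a.getD i 0) ans) 0

-- ===== PORT B =====
-- `while v + 1 < n and a[v+1] < a[v]: v += 1`
def pvFindV (a : List Int) (n : Nat) (v : Nat) : Nat :=
  if h : v + 1 < n ∧ a.getD (v + 1) 0 < a.getD v 0 then pvFindV a n (v + 1) else v
termination_by n - v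
decreasing_by omega

theorem pvFindV_ge (a : List Int) (n v : Nat) : v ≤ pvFindV a n v := by
  unfold pvFindV
  split
  · exact le_trans (by omega) (pvFindV_ge a n (v + 1))
  · exact le_refl v
termination_by n - v
decreasing_by omega

-- the outer `while i < n` loop of B; state (ans, up, i); the inner `for j in range(v, i-1, -1)`
-- is the foldl over the reversed index range carrying (r, ans)
def pvGoB (a : List Int) (n : Nat) (ans up : Int) (i : Nat) : Int :=
  if h : i < n then
    if a.getD i 0 < a.getD (i - 1) 0 then
      let v := pvFindV a n i
      let p := ((List.range' i (v - i + 1)).reverse).foldl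
        (fun s j => (s.1 + a.getD j 0, max s.2 (s.1 + a.getD j 0))) (0, ans)
      pvGoB a n (max p.2 (up + p.1)) (a.getD v 0) (v + 1)
    else
      pvGoB a n (max ans up)
        (if a.getD i 0 == a.getD (i - 1) 0 then a.getD i 0 else up + a.getD i 0) (i + 1)
  else max ans up
termination_by n - i
decreasing_by
  · have := pvFindV_ge a n i; omega
  · omega

def maxSumBitonicSubArr_alt (a : List Int) (n : Int) : Int :=
  pvGoB a n.toNat 0 (a.getD 0 0) 1

-- ===== PRECONDITION & SPEC =====
-- Pre_: exactly the inputs where Python A returns normally; for n < 1 the write left[0] = a[0]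
-- hits an empty list and for n > len(a) the loops read past the end — IndexError either way.
def Pre_maxSumBitonicSubArr (a : List Int) (n : Int) : Prop := 1 ≤ n ∧ n ≤ a.length
instance (a : List Int) (n : Int) : Decidable (Pre_maxSumBitonicSubArr a n) := by
  unfold Pre_maxSumBitonicSubArr; infer_instance

def pvWitness_maxSumBitonicSubArr : List Int × Int := ([1, 3, 2, 5], 4)

def Spec_maxSumBitonicSubArr (a : List Int) (n : Int) (out : Int) : Prop := out = maxSumBitonicSubArr_alt a n
instance (a : List Int) (n : Int) (out : Int) : Decidable (Spec_maxSumBitonicSubArr a n out) := by unfold Spec_maxSumBitonicSubArr; infer_instance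

-- ===== CLAIM (what is proved, stated in full; the proofs are below) =====
def Claim_equal_maxSumBitonicSubArr : Prop := ∀ (a : List Int) (n : Int), Dom_maxSumBitonicSubArr a n → Pre_maxSumBitonicSubArr a n → Spec_maxSumBitonicSubArr a n (maxSumBitonicSubArr a n)

-- ===== LEMMAS AND PROOFS =====

-- the common specification both ports are reduced to:
-- pvL a i = sum of the maximal strictly increasing run ending at i (Python's left[i])
def pvL (a : List Int) : Nat → Int
  | 0 => a.getD 0 0
  | i + 1 => if a.getD (i + 1) 0 > a.getD i 0 then pvL a i + a.getD (i + 1) 0 else a.getD (i + 1) 0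

-- pvR a i c = Python's right[i] when i + c = n - 1
def pvR (a : List Int) (i : Nat) : Nat → Int
  | 0 => a.getD i 0
  | c + 1 => if a.getD i 0 > a.getD (i + 1) 0 then pvR a (i + 1) c + a.getD i 0 else a.getD i 0

def pvF (a : List Int) (n i : Nat) : Int := pvL a i + pvR a i (n - 1 - i) - a.getD i 0

-- max of pvF over indices lo, lo+1, ..., lo+c
def pvSup (a : List Int) (n lo : Nat) : Nat → Int
  | 0 => pvF a n lo
  | c + 1 => max (pvF a n lo) (pvSup a n (lo + 1) c)

-- sum a[j] + a[j+1] + ... + a[j+c]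
def pvSumTo (a : List Int) (j : Nat) : Nat → Int
  | 0 => a.getD j 0
  | c + 1 => a.getD j 0 + pvSumTo a (j + 1) c

theorem pvF_le_pvSup (a : List Int) (n lo : Nat) : ∀ c, pvF a n lo ≤ pvSup a n lo c := by
  intro c; cases c with
  | zero => exact le_refl _
  | succ c => exact le_max_left _ _

theorem pvSup_glue (a : List Int) (n : Nat) :
    ∀ c1 lo c2, pvSup a n lo (c1 + c2) = max (pvSup a n lo c1) (pvSup a n (lo + c1) c2) := by
  intro c1
  induction c1 with
  | zero =>
    intro lo c2
    simp [pvSup, max_eq_right (pvF_le_pvSup a n lo c2)]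
  | succ c ih =>
    intro lo c2
    have : c + 1 + c2 = (c + c2) + 1 := by omega
    rw [this]
    show max (pvF a n lo) (pvSup a n (lo + 1) (c + c2)) = _
    rw [ih (lo + 1) c2]
    have : lo + (c + 1) = lo + 1 + c := by omega
    rw [this, pvSup, max_assoc]

theorem pvSup_snoc (a : List Int) (n : Nat) :
    ∀ c lo, pvSup a n lo (c + 1) = max (pvSup a n lo c) (pvF a n (lo + c + 1)) := by
  intro c
  induction c with
  | zero => intro lo; simp [pvSup]
  | succ c ih =>
    intro lo
    rw [pvSup, ih (lo + 1), pvSup, ← max_assoc]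
    congr 2
    omega

-- ----- A-port reduction -----

theorem pvLeftTail_getD (a : List Int) :
    ∀ c i k, 1 ≤ i → k < c →
      (pvLeftTail a (pvL a (i - 1)) i c).getD k 0 = pvL a (i + k) := by
  intro c
  induction c with
  | zero => intro i k _ hk; omega
  | succ c ih =>
    intro i k hi hk
    obtain ⟨j, rfl⟩ : ∃ j, i = j + 1 := ⟨i - 1, by omega⟩
    have hcur : (if a.getD (j + 1) 0 > a.getD (j + 1 - 1) 0
        then pvL a (j + 1 - 1) + a.getD (j + 1) 0 else a.getD (j + 1) 0) = pvL a (j + 1) := by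
      simp only [Nat.add_sub_cancel]
      rw [pvL]
    cases k with
    | zero =>
      simp only [pvLeftTail, List.getD_cons_zero]
      exact hcur
    | succ k =>
      simp only [pvLeftTail, List.getD_cons_succ]
      rw [hcur]
      have := ih (j + 2) (k) (by omega) (by omega)
      rw [show (j + 2) - 1 = j + 1 by omega] at this
      rw [this]
      congr 1
      omega

theorem pvRightFrom_getD (a : List Int) :
    ∀ c i k, k ≤ c → (pvRightFrom a i c).getD k 0 = pvR a (i + k) (c - k) := by
  intro c
  induction c with
  | zero =>
    intro i k hk
    interval_cases k
    simp [pvRightFrom, pvR]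
  | succ c ih =>
    intro i k hk
    have hhd : (pvRightFrom a (i + 1) c).headD 0 = (pvRightFrom a (i + 1) c).getD 0 0 := by
      cases c <;> rfl
    have hhead : (pvRightFrom a (i + 1) c).headD 0 = pvR a (i + 1) c := by
      rw [hhd]
      have := ih (i + 1) 0 (by omega)
      simpa using this
    cases k with
    | zero =>
      simp only [pvRightFrom, List.getD_cons_zero, hhead]
      simp [pvR]
    | succ k =>
      simp only [pvRightFrom, List.getD_cons_succ]
      rw [ih (i + 1) k (by omega)]
      congr 1 <;> omega

theorem foldA_spec (a : List Int) (n : Nat) :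
    ∀ m s, (List.range (m + 1)).foldl (fun ans i => max (pvF a n i) ans) s
      = max s (pvSup a n 0 m) := by
  intro m
  induction m with
  | zero => intro s; simp [pvSup, List.range_succ, max_comm]
  | succ m ih =>
    intro s
    rw [List.range_succ, List.foldl_append]
    simp only [List.foldl_cons, List.foldl_nil]
    rw [ih, pvSup_snoc]
    simp only [Nat.zero_add]
    rw [max_left_comm, max_comm (pvF a n (m + 1)) (pvSup a n 0 m)]

theorem portA_spec (a : List Int) (n : Int) (h1 : 1 ≤ n) (_h2 : n ≤ a.length) :
    maxSumBitonicSubArr a n = max 0 (pvSup a n.toNat 0 (n.toNat - 1)) := by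
  unfold maxSumBitonicSubArr
  have hfold : (List.range n.toNat).foldl
      (fun ans i => max ((a.getD 0 0 :: pvLeftTail a (a.getD 0 0) 1 (n.toNat - 1)).getD i 0
        + (pvRightFrom a 0 (n.toNat - 1)).getD i 0 - a.getD i 0) ans) 0
      = (List.range n.toNat).foldl (fun ans i => max (pvF a n.toNat i) ans) 0 := by
    apply PySem.List.foldl_congr_mem
    intro acc i hi
    have hin : i < n.toNat := by simpa [List.mem_range] using hi
    have hleft : (a.getD 0 0 :: pvLeftTail a (a.getD 0 0) 1 (n.toNat - 1)).getD i 0 = pvL a i := by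
      cases i with
      | zero => simp [pvL]
      | succ k =>
        simp only [List.getD_cons_succ]
        have h0 : a.getD 0 0 = pvL a (1 - 1) := by simp [pvL]
        rw [h0, pvLeftTail_getD a (n.toNat - 1) 1 k (by omega) (by omega), Nat.add_comm 1 k]
    have hright : (pvRightFrom a 0 (n.toNat - 1)).getD i 0 = pvR a i (n.toNat - 1 - i) := by
      have := pvRightFrom_getD a (n.toNat - 1) 0 i (by omega)
      simpa using this
    rw [hleft, hright]
    rfl
  rw [hfold]
  obtain ⟨m, hm⟩ : ∃ m, n.toNat = m + 1 := ⟨n.toNat - 1, by omega⟩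
  rw [hm, foldA_spec]
  norm_num

-- ----- B-port reduction -----

theorem pvFindV_lt (a : List Int) (n : Nat) : ∀ v, v < n → pvFindV a n v < n := by
  intro v
  induction hv : n - v using Nat.strong_induction_on generalizing v with
  | _ d ih =>
    intro hvn
    unfold pvFindV
    split
    · exact ih (n - (v + 1)) (by omega) (v + 1) rfl (by omega)
    · exact hvn

theorem pvFindV_run (a : List Int) (n : Nat) :
    ∀ v j, v ≤ j → j < pvFindV a n v → a.getD (j + 1) 0 < a.getD j 0 := by
  intro v
  induction hv : n - v using Nat.strong_induction_on generalizing v with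
  | _ d ih =>
    intro j hj hj2
    rw [pvFindV] at hj2
    by_cases h : v + 1 < n ∧ a.getD (v + 1) 0 < a.getD v 0
    · rw [dif_pos h] at hj2
      rcases Nat.eq_or_lt_of_le hj with rfl | hlt
      · exact h.2
      · exact ih (n - (v + 1)) (by omega) (v + 1) rfl j (by omega) hj2
    · rw [dif_neg h] at hj2; omega

theorem pvFindV_break (a : List Int) (n : Nat) :
    ∀ v, ¬ (pvFindV a n v + 1 < n ∧ a.getD (pvFindV a n v + 1) 0 < a.getD (pvFindV a n v) 0) := by
  intro v
  induction hv : n - v using Nat.strong_induction_on generalizing v with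
  | _ d ih =>
    rw [pvFindV]
    by_cases h : v + 1 < n ∧ a.getD (v + 1) 0 < a.getD v 0
    · rw [dif_pos h]; exact ih (n - (v + 1)) (by omega) (v + 1) rfl
    · rw [dif_neg h]; exact h

-- on a strictly decreasing run [lo, v] (maximal to the right), right[j] is the run-suffix sum
theorem pvR_run (a : List Int) (n lo v : Nat) (hvn : v < n)
    (hbrk : ¬ (v + 1 < n ∧ a.getD (v + 1) 0 < a.getD v 0))
    (hrun : ∀ j, lo ≤ j → j < v → a.getD (j + 1) 0 < a.getD j 0) :
    ∀ c j, lo ≤ j → j + c = v → pvR a j (n - 1 - j) = pvSumTo a j c := by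
  intro c
  induction c with
  | zero =>
    intro j hlo hj
    subst hj
    simp only [Nat.add_zero] at *
    rcases Nat.eq_or_lt_of_le (Nat.succ_le_of_lt hvn) with he | hlt
    · have : n - 1 - j = 0 := by omega
      rw [this]; rfl
    · obtain ⟨c', hc'⟩ : ∃ c', n - 1 - j = c' + 1 := ⟨n - 2 - j, by omega⟩
      rw [hc', pvR]
      have : ¬ a.getD j 0 > a.getD (j + 1) 0 := by
        intro hgt; exact hbrk ⟨by omega, hgt⟩
      rw [if_neg this]; rfl
  | succ c ih =>
    intro j hlo hj
    obtain ⟨c', hc'⟩ : ∃ c', n - 1 - j = c' + 1 := ⟨n - 2 - j, by omega⟩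
    rw [hc', pvR]
    have hlt : a.getD (j + 1) 0 < a.getD j 0 := hrun j hlo (by omega)
    rw [if_pos hlt]
    have : c' = n - 1 - (j + 1) := by omega
    rw [this, ih (j + 1) (by omega) (by omega)]
    show pvSumTo a (j + 1) c + a.getD j 0 = a.getD j 0 + pvSumTo a (j + 1) c
    ring

theorem pvL_run (a : List Int) (j : Nat) (h1 : 1 ≤ j)
    (hlt : a.getD j 0 < a.getD (j - 1) 0) : pvL a j = a.getD j 0 := by
  obtain ⟨k, rfl⟩ : ∃ k, j = k + 1 := ⟨j - 1, by omega⟩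
  simp only [Nat.add_sub_cancel] at hlt
  rw [pvL, if_neg (not_lt.mpr (le_of_lt hlt))]

-- the inner backward walk over a decreasing run [lo, v]: it sums the run and maxes its pvF values
theorem foldRun_spec (a : List Int) (n lo v : Nat) (hvn : v < n)
    (hbrk : ¬ (v + 1 < n ∧ a.getD (v + 1) 0 < a.getD v 0))
    (hL : ∀ j, lo ≤ j → j ≤ v → pvL a j = a.getD j 0)
    (hrun : ∀ j, lo ≤ j → j < v → a.getD (j + 1) 0 < a.getD j 0) :
    ∀ c i ans, lo ≤ i → i + c = v →
      ((List.range' i (c + 1)).reverse).foldl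
        (fun s j => (s.1 + a.getD j 0, max s.2 (s.1 + a.getD j 0))) (0, ans)
      = (pvSumTo a i c, max ans (pvSup a n i c)) := by
  have hF : ∀ c j, lo ≤ j → j + c = v → pvF a n j = pvSumTo a j c := by
    intro c j hlo hj
    unfold pvF
    rw [hL j hlo (by omega), pvR_run a n lo v hvn hbrk hrun c j hlo hj]
    ring
  intro c
  induction c with
  | zero =>
    intro i ans hlo hi
    have h1 : pvF a n i = a.getD i 0 := hF 0 i hlo hi
    simp only [List.range'_one, List.reverse_cons, List.reverse_nil,
      List.nil_append, List.foldl_cons, List.foldl_nil, zero_add]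
    rw [show pvSumTo a i 0 = a.getD i 0 from rfl,
      show pvSup a n i 0 = pvF a n i from rfl, h1]
  | succ c ih =>
    intro i ans hlo hi
    have hsplit : List.range' i (c + 1 + 1) = i :: List.range' (i + 1) (c + 1) := by
      rw [List.range'_succ]
    rw [hsplit, List.reverse_cons, List.foldl_append, ih (i + 1) ans (by omega) (by omega)]
    simp only [List.foldl_cons, List.foldl_nil]
    have hFi : pvF a n i = pvSumTo a (i + 1) c + a.getD i 0 := by
      rw [hF (c + 1) i hlo hi]
      show a.getD i 0 + pvSumTo a (i + 1) c = _
      ring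
    rw [Prod.mk.injEq]
    constructor
    · show pvSumTo a (i + 1) c + a.getD i 0 = a.getD i 0 + pvSumTo a (i + 1) c
      ring
    · show max (max ans (pvSup a n (i + 1) c)) (pvSumTo a (i + 1) c + a.getD i 0)
        = max ans (pvSup a n i (c + 1))
      rw [pvSup, ← hFi, max_assoc, max_comm (pvSup a n (i + 1) c) (pvF a n i), ← max_assoc]

theorem pvGoB_spec (a : List Int) (n : Nat) :
    ∀ d i ans up, n - i ≤ d → 1 ≤ i → i ≤ n → up = pvL a (i - 1) →
      pvGoB a n ans up i = max ans (pvSup a n (i - 1) (n - i)) := by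
  have hstop : ∀ i ans up, 1 ≤ i → i = n → up = pvL a (i - 1) →
      pvGoB a n ans up i = max ans (pvSup a n (i - 1) (n - i)) := by
    intro i ans up h1 hieq hup
    rw [pvGoB, dif_neg (by omega)]
    have h0 : n - i = 0 := by omega
    rw [h0, pvSup]
    unfold pvF
    have hz : n - 1 - (i - 1) = 0 := by omega
    rw [hz, pvR, hup]
    congr 1
    ring
  intro d
  induction d with
  | zero =>
    intro i ans up hd h1 h2 hup
    exact hstop i ans up h1 (by omega) hup
  | succ d ih =>
    intro i ans up hd h1 h2 hup
    by_cases hin : i < n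
    case neg => exact hstop i ans up h1 (by omega) hup
    by_cases hdec : a.getD i 0 < a.getD (i - 1) 0
    · have hiv : i ≤ pvFindV a n i := pvFindV_ge a n i
      have hvn : pvFindV a n i < n := pvFindV_lt a n i hin
      have hbrk := pvFindV_break a n i
      have hstep : pvGoB a n ans up i
          = pvGoB a n
              (max (((List.range' i (pvFindV a n i - i + 1)).reverse).foldl
                  (fun s j => (s.1 + a.getD j 0, max s.2 (s.1 + a.getD j 0))) (0, ans)).2
                (up + (((List.range' i (pvFindV a n i - i + 1)).reverse).foldl
                  (fun s j => (s.1 + a.getD j 0, max s.2 (s.1 + a.getD j 0))) (0, ans)).1))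
              (a.getD (pvFindV a n i) 0) (pvFindV a n i + 1) := by
        rw [pvGoB, dif_pos hin, if_pos hdec]
      rw [hstep]
      set v := pvFindV a n i with hv
      have hrun : ∀ j, i ≤ j → j < v → a.getD (j + 1) 0 < a.getD j 0 :=
        fun j hj hj2 => pvFindV_run a n i j hj hj2
      have hL : ∀ j, i ≤ j → j ≤ v → pvL a j = a.getD j 0 := by
        intro j hji hjv
        rcases Nat.eq_or_lt_of_le hji with rfl | hlt
        · exact pvL_run a i h1 hdec
        · apply pvL_run a j (by omega)
          have := hrun (j - 1) (by omega) (by omega)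
          have hj1 : j - 1 + 1 = j := by omega
          rwa [hj1] at this
      rw [foldRun_spec a n i v hvn hbrk hL hrun (v - i) i ans (le_refl i) (by omega)]
      -- peak value: pvF (i-1) = up + run sum
      have hFpeak : pvF a n (i - 1) = up + pvSumTo a i (v - i) := by
        unfold pvF
        obtain ⟨c', hc'⟩ : ∃ c', n - 1 - (i - 1) = c' + 1 := ⟨n - 1 - i, by omega⟩
        rw [hc', pvR]
        have hgt : a.getD (i - 1) 0 > a.getD (i - 1 + 1) 0 := by
          have : i - 1 + 1 = i := by omega
          rw [this]; exact hdec
        rw [if_pos hgt]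
        have h1' : i - 1 + 1 = i := by omega
        have h2' : c' = n - 1 - i := by omega
        rw [h1', h2', pvR_run a n i v hvn hbrk hrun (v - i) i (le_refl i) (by omega), hup]
        ring
      rw [ih (v + 1) (max (max ans (pvSup a n i (v - i))) (up + pvSumTo a i (v - i)))
        (a.getD v 0) (by omega) (by omega) (by omega)
        (by simp only [Nat.add_sub_cancel]; exact (hL v hiv (le_refl v)).symm)]
      have hsub : v + 1 - 1 = v := by omega
      rw [hsub]
      have hglue1 : pvSup a n (i - 1) (n - i) = max (pvF a n (i - 1)) (pvSup a n i (n - 1 - i)) := by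
        obtain ⟨c, hc⟩ : ∃ c, n - i = c + 1 := ⟨n - 1 - i, by omega⟩
        rw [hc, pvSup]
        have hi1 : i - 1 + 1 = i := by omega
        have hc2 : c = n - 1 - i := by omega
        rw [hi1, hc2]
      have hglue2 : pvSup a n i (n - 1 - i)
          = max (pvSup a n i (v - i)) (pvSup a n v (n - (v + 1))) := by
        have hc : n - 1 - i = (v - i) + (n - (v + 1)) := by omega
        rw [hc, pvSup_glue]
        have : i + (v - i) = v := by omega
        rw [this]
      rw [hglue1, hglue2, ← hFpeak]
      generalize pvSup a n i (v - i) = X at *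
      generalize pvSup a n v (n - (v + 1)) = Y at *
      generalize pvF a n (i - 1) = P at *
      rw [max_comm P (max X Y), max_assoc X Y P, max_comm Y P, ← max_assoc X P Y,
        ← max_assoc, ← max_assoc]
    · have hstep : pvGoB a n ans up i
          = pvGoB a n (max ans up)
              (if a.getD i 0 == a.getD (i - 1) 0 then a.getD i 0 else up + a.getD i 0)
              (i + 1) := by
        rw [pvGoB, dif_pos hin, if_neg hdec]
      rw [hstep]
      -- up = pvF (i-1) here: right[i-1] = a[i-1] because the step does not decrease
      have hFup : pvF a n (i - 1) = up := by
        unfold pvF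
        obtain ⟨c', hc'⟩ : ∃ c', n - 1 - (i - 1) = c' + 1 := ⟨n - 1 - i, by omega⟩
        rw [hc', pvR]
        have hngt : ¬ a.getD (i - 1) 0 > a.getD (i - 1 + 1) 0 := by
          have : i - 1 + 1 = i := by omega
          rw [this]; exact hdec
        rw [if_neg hngt, hup]
        ring
      have hup' : (if a.getD i 0 == a.getD (i - 1) 0 then a.getD i 0 else up + a.getD i 0)
          = pvL a ((i + 1) - 1) := by
        simp only [Nat.add_sub_cancel]
        obtain ⟨k, hk⟩ : ∃ k, i = k + 1 := ⟨i - 1, by omega⟩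
        subst hk
        simp only [Nat.add_sub_cancel] at hdec hup ⊢
        rw [pvL]
        simp only [beq_iff_eq]
        by_cases he : a.getD (k + 1) 0 = a.getD k 0
        · rw [if_pos he, if_neg (show ¬ a.getD k 0 < a.getD (k + 1) 0 from by
            rw [he]; exact lt_irrefl _)]
        · have hgt : a.getD (k + 1) 0 > a.getD k 0 := by
            rcases lt_trichotomy (a.getD (k + 1) 0) (a.getD k 0) with h | h | h
            · exact absurd h hdec
            · exact absurd h he
            · exact h
          rw [if_neg he, if_pos hgt, hup]
      rw [ih (i + 1) (max ans up) _ (by omega) (by omega) (by omega) hup']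
      have hs : i + 1 - 1 = i := by omega
      rw [hs]
      have hglue : pvSup a n (i - 1) (n - i)
          = max (pvF a n (i - 1)) (pvSup a n i (n - (i + 1))) := by
        obtain ⟨c, hc⟩ : ∃ c, n - i = c + 1 := ⟨n - 1 - i, by omega⟩
        rw [hc, pvSup]
        have hi1 : i - 1 + 1 = i := by omega
        have hc2 : c = n - (i + 1) := by omega
        rw [hi1, hc2]
      rw [hglue, hFup, max_assoc]

theorem portB_spec (a : List Int) (n : Int) (h1 : 1 ≤ n) (_h2 : n ≤ a.length) :
    maxSumBitonicSubArr_alt a n = max 0 (pvSup a n.toNat 0 (n.toNat - 1)) := by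
  unfold maxSumBitonicSubArr_alt
  have h0 : a.getD 0 0 = pvL a (1 - 1) := by simp [pvL]
  rw [pvGoB_spec a n.toNat (n.toNat - 1) 1 0 (a.getD 0 0) (by omega) (by omega) (by omega) h0]

-- ===== VERDICT (by name: the statement is the Claim_ definition above) =====
theorem maxSumBitonicSubArr_spec : Claim_equal_maxSumBitonicSubArr := by
  intro a n _ hpre
  obtain ⟨h1, h2⟩ := hpre
  unfold Spec_maxSumBitonicSubArr
  rw [portA_spec a n h1 h2, portB_spec a n h1 h2]
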